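-- pv_equiv track=rewrite | github.com/NahuriraClintonie/mission1-power-of-four | main.py | process_cases
-- ===== SOURCE A (Python) =====
-- def sum_fourth_powers(nums):
--     if not nums:
--         return 0
--     head, *tail = nums
--     return ((head ** 4) if head <= 0 else 0) + sum_fourth_powers(tail)
--
-- def process_cases(lines, index, remaining):
--     if remaining == 0:
--         return [], index
--
--     if index >= len(lines):
--         return ["-1"], index
--
--     try:
--         x = int(lines[index].strip())
--     except:
--         return ["-1"], index + 1
--
--     index += 1
--     if index >= len(lines):
--         return ["-1"], index
--
--     raw_nums = lines[index].strip().split()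
--     index += 1
--
--     if len(raw_nums) != x:
--         result = "-1"
--     else:
--         try:
--             nums = list(map(int, raw_nums))
--             result = str(sum_fourth_powers(nums))
--         except:
--             result = "-1"
--
--     rest_results, new_index = process_cases(lines, index, remaining - 1)
--     return [result] + rest_results, new_index
-- ===== SOURCE B (Python) =====
-- def process_cases(lines, index, remaining):
--     results = []
--     i = index
--     while remaining != 0:
--         if i >= len(lines):
--             return results + ["-1"], i
--         try:
--             x = int(lines[i].strip())
--         except (ValueError, IndexError):
--             return results + ["-1"], i + 1
--         i += 1
--         if i >= len(lines):
--             return results + ["-1"], i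
--         parts = lines[i].strip().split()
--         i += 1
--         if len(parts) == x:
--             try:
--                 res = str(sum(n ** 4 for n in (int(p) for p in parts) if n <= 0))
--             except ValueError:
--                 res = "-1"
--         else:
--             res = "-1"
--         results.append(res)
--         remaining -= 1
--     return results, i
-- ===== Notes on version B (the rewrite author's own statement) =====
-- stated objective: alternative
-- what changed: Replaced A's two recursions (the case recursion that rebuilds the result list by prepending, and the recursive sum_fourth_powers) with a single iterative while-loop over an accumulator list and a generator-expression sum.
import Mathlib
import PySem

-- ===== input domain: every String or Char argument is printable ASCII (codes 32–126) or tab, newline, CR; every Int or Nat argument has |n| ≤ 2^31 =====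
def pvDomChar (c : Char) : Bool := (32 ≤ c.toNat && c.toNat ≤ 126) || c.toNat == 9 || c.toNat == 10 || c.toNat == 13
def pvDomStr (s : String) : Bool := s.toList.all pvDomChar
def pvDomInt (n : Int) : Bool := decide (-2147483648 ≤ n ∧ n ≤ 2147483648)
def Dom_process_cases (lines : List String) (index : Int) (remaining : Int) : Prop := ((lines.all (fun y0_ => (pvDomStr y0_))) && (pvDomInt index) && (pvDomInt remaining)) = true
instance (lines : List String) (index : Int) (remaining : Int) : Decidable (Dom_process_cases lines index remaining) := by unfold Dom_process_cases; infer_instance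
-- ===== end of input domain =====

-- B replaces A's two recursions (case recursion + recursive fourth-power sum) by one
-- iterative accumulator loop and a generator-expression sum; same cost, flat stack.

-- ===== PORT A =====

-- list(map(int, raw_nums)) inside try/except: none = some element raises ValueError
def mapInt? : List String → Option (List Int)
  | [] => some []
  | s :: rest =>
    match PySem.Int.ofStr? s with
    | none => none
    | some n => (mapInt? rest).map (fun t => n :: t)

def sum_fourth_powers : List Int → Int
  | [] => 0
  | head :: tail => (if head ≤ 0 then head ^ 4 else 0) + sum_fourth_powers tail

def process_cases (lines : List String) (index : Int) (remaining : Int) : List String × Int :=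
  if remaining = 0 then ([], index)
  else if _h1 : index ≥ (lines.length : Int) then (["-1"], index)
  else
    -- try: x = int(lines[index].strip()) — the bare except catches IndexError (index < -len)
    -- and ValueError alike and both return (["-1"], index + 1), so the try block is one
    -- Option pipeline with a single none branch
    match (PySem.List.pyGet? lines index).bind (fun s => PySem.Int.ofStr? (PySem.Str.strip s)) with
    | none => (["-1"], index + 1)
    | some x =>
      if _h2 : index + 1 ≥ (lines.length : Int) then (["-1"], index + 1)
      else
        -- lines[index] here is provably in range (index+1 ∈ [-len+1, len)), so pyGetD is exact
        let raw_nums := PySem.Str.split₀ (PySem.Str.strip (PySem.List.pyGetD lines (index + 1) ""))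
        let result :=
          if (raw_nums.length : Int) ≠ x then "-1"
          else
            match mapInt? raw_nums with
            | none => "-1"
            | some nums => PySem.Int.toStr (sum_fourth_powers nums)
        let rest := process_cases lines (index + 2) (remaining - 1)
        (result :: rest.1, rest.2)
termination_by (remaining.toNat + ((lines.length : Int) - index).toNat)
decreasing_by simp_wf; omega

-- ===== PORT B =====

-- the while-loop of Source B: state = (results accumulator, current index, remaining);
-- the `try: x = int(lines[i].strip()) except (ValueError, IndexError)` is the same
-- single-none-branch Option pipeline as in port A
def pcLoop (lines : List String) (results : List String) (i : Int) (remaining : Int) : List String × Int :=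
  if remaining = 0 then (results, i)
  else if _h1 : i ≥ (lines.length : Int) then (results ++ ["-1"], i)
  else
    match (PySem.List.pyGet? lines i).bind (fun s => PySem.Int.ofStr? (PySem.Str.strip s)) with
    | none => (results ++ ["-1"], i + 1)
    | some x =>
      if _h2 : i + 1 ≥ (lines.length : Int) then (results ++ ["-1"], i + 1)
      else
        let parts := PySem.Str.split₀ (PySem.Str.strip (PySem.List.pyGetD lines (i + 1) ""))
        let res :=
          if (parts.length : Int) = x then
            match mapInt? parts with
            | none => "-1"
            | some nums =>
              -- str(sum(n ** 4 for n in nums if n <= 0))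
              PySem.Int.toStr (nums.foldl (fun acc n => if n ≤ 0 then acc + n ^ 4 else acc) 0)
          else "-1"
        pcLoop lines (results ++ [res]) (i + 2) (remaining - 1)
termination_by (remaining.toNat + ((lines.length : Int) - i).toNat)
decreasing_by simp_wf; omega

def process_cases_alt (lines : List String) (index : Int) (remaining : Int) : List String × Int :=
  pcLoop lines [] index remaining

-- ===== PRECONDITION & SPEC =====
def Spec_process_cases (lines : List String) (index : Int) (remaining : Int) (out : List String × Int) : Prop := out = process_cases_alt lines index remaining
instance (lines : List String) (index : Int) (remaining : Int) (out : List String × Int) : Decidable (Spec_process_cases lines index remaining out) := by unfold Spec_process_cases; infer_instance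

-- ===== CLAIM (what is proved, stated in full; the proofs are below) =====
def Claim_equal_process_cases : Prop := ∀ (lines : List String) (index : Int) (remaining : Int), Dom_process_cases lines index remaining → Spec_process_cases lines index remaining (process_cases lines index remaining)

-- ===== LEMMAS AND PROOFS =====

-- the fold in B computes sum_fourth_powers (shifted by the accumulator)
theorem foldl_sum_fourth (nums : List Int) (acc : Int) :
    nums.foldl (fun acc n => if n ≤ 0 then acc + n ^ 4 else acc) acc
      = acc + sum_fourth_powers nums := by
  induction nums generalizing acc with
  | nil => simp [sum_fourth_powers]
  | cons h t ih =>
    simp only [List.foldl_cons, sum_fourth_powers, ih]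
    split <;> ring

-- B's loop = accumulator ++ A's result
set_option maxHeartbeats 1600000 in
theorem pcLoop_eq (lines : List String) (i r : Int) :
    ∀ results, pcLoop lines results i r
      = (results ++ (process_cases lines i r).1, (process_cases lines i r).2) := by
  induction i, r using process_cases.induct lines with
  | case1 i =>
    intro results
    rw [pcLoop, process_cases]
    simp
  | case2 i r h h1 =>
    intro results
    rw [pcLoop, process_cases]
    simp [h, h1]
  | case3 i r h h1 hget =>
    intro results
    rw [pcLoop, process_cases]
    simp [h, h1, hget]
  | case4 i r h h1 x hget h2 =>
    intro results
    rw [pcLoop, process_cases]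
    simp [h, h1, hget, h2]
  | case5 i r h h1 x hget h2 ih =>
    intro results
    rw [pcLoop, process_cases]
    simp only [h, h1, hget, h2, ite_not]
    rw [ih]
    by_cases hx :
        ((PySem.Str.split₀ (PySem.Str.strip (PySem.List.pyGetD lines (i + 1) ""))).length : Int) = x
    · simp only [hx, if_pos]
      cases hm : mapInt? (PySem.Str.split₀ (PySem.Str.strip (PySem.List.pyGetD lines (i + 1) ""))) with
      | none => simp
      | some nums => simp [foldl_sum_fourth nums 0]
    · simp [hx]

-- ===== VERDICT (by name: the statement is the Claim_ definition above) =====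
theorem process_cases_spec : Claim_equal_process_cases := by
  intro lines index remaining _
  unfold Spec_process_cases process_cases_alt
  rw [pcLoop_eq]
  simp
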